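-- pv_equiv track=rewrite | github.com/Gabicus/dejaviewed | scripts/digest.py | derive_actionable
-- ===== SOURCE A (Python) =====
-- def derive_actionable(members: list[dict]) -> list[dict]:
--     """Pick the most clickable links across cluster members, preferring repos/guides/tools."""
--     def rank(link: dict) -> int:
--         kind = (link.get("kind") or "").lower()
--         return {"repo": 0, "guide": 1, "tool": 2, "paper": 3}.get(kind, 4)
--
--     seen_hrefs: set[str] = set()
--     picked: list[dict] = []
--     for m in members:
--         for link in sorted(m.get("links") or [], key=rank):
--             href = link.get("url") or link.get("href")
--             label = link.get("label") or link.get("title") or href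
--             if not href or href in seen_hrefs:
--                 continue
--             seen_hrefs.add(href)
--             picked.append({"href": href, "label": label[:80]})
--             if len(picked) >= 3:
--                 return picked
--     return picked
-- ===== SOURCE B (Python) =====
-- def derive_actionable(members: list[dict]) -> list[dict]:
--     """Counting-sort rewrite: distribute each member's links into 5 rank buckets
--     (repo/guide/tool/paper/other) instead of calling sorted(), then stream."""
--     table = {"repo": 0, "guide": 1, "tool": 2, "paper": 3}
--     seen = set()
--     picked = []
--     for m in members:
--         buckets = ([], [], [], [], [])
--         for link in (m.get("links") or []):
--             kind = (link.get("kind") or "").lower()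
--             buckets[table.get(kind, 4)].append(link)
--         for link in buckets[0] + buckets[1] + buckets[2] + buckets[3] + buckets[4]:
--             if len(picked) >= 3:
--                 break
--             href = link.get("url") or link.get("href")
--             if not href or href in seen:
--                 continue
--             label = link.get("label") or link.get("title") or href
--             seen.add(href)
--             picked.append({"href": href, "label": label[:80]})
--     return picked
-- ===== Notes on version B (the rewrite author's own statement) =====
-- stated objective: alternative
-- what changed: Replaces the per-member comparison sort sorted(links, key=rank) with a 5-bucket counting sort (one distribution pass, buckets concatenated) and the early return with a length guard in the picking step.
import Mathlib
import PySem

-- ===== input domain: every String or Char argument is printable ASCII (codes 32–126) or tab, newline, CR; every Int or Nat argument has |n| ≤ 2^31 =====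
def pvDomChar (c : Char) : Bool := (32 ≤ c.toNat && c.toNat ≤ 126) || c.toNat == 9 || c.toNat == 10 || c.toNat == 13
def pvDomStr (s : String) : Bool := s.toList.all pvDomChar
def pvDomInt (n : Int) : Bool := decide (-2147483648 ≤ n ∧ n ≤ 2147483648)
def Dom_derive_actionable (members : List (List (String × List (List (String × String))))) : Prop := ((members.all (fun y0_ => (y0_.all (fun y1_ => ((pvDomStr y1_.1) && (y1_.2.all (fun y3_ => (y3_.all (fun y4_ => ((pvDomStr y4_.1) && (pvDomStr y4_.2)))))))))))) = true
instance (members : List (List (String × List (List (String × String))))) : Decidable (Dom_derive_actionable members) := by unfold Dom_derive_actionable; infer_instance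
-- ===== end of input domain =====

-- B replaces A's per-member sorted(links, key=rank) by a 5-bucket counting sort and the
-- early-return flag by a length guard in the picking step; same return value everywhere.

-- ===== PORT A =====
-- Python's `a or b` on str-or-None values (falsy = None or "")
def pyOrStr (a b : Option String) : Option String :=
  match a with
  | some s => if s = "" then b else some s
  | none => b

-- Python's `a or b` where b is a plain str
def pyOrStrD (a : Option String) (b : String) : String :=
  match a with
  | some s => if s = "" then b else s
  | none => b

def rankTable : PySem.Dict String Int :=
  PySem.Dict.mk [("repo", 0), ("guide", 1), ("tool", 2), ("paper", 3)]

-- A's inner `rank` helper: {"repo":0,...}.get((link.get("kind") or "").lower(), 4)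
def linkRank (link : List (String × String)) : Int :=
  PySem.Dict.getD rankTable
    (PySem.Str.lower (pyOrStrD (PySem.Dict.get? (PySem.Dict.mk link) "kind") "")) 4

def pickEntry (h label : String) : List (String × String) :=
  [("href", h), ("label", PySem.Str.slice label none (some 80))]

-- loop body of A, state = (seen_hrefs, picked, returned-early flag)
def stepA (st : PySem.Set String × List (List (String × String)) × Bool)
    (link : List (String × String)) :
    PySem.Set String × List (List (String × String)) × Bool :=
  if st.2.2 then st
  else
    match pyOrStr (PySem.Dict.get? (PySem.Dict.mk link) "url")
        (PySem.Dict.get? (PySem.Dict.mk link) "href") with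
    | none => st
    | some h =>
      if (h == "") || PySem.Set.contains st.1 h then st
      else
        let label := pyOrStrD (PySem.Dict.get? (PySem.Dict.mk link) "label")
          (pyOrStrD (PySem.Dict.get? (PySem.Dict.mk link) "title") h)
        let picked := st.2.1 ++ [pickEntry h label]
        (PySem.Set.add st.1 h, picked, decide (3 ≤ picked.length))

def derive_actionable (members : List (List (String × List (List (String × String))))) :
    List (List (String × String)) :=
  (members.foldl
    (fun st m =>
      if st.2.2 then st   -- already returned
      else (PySem.List.sorted (PySem.Dict.getD (PySem.Dict.mk m) "links" []) linkRank).foldl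
        stepA st)
    (PySem.Set.empty, [], false)).2.1

-- ===== PORT B =====
-- Source B: buckets[table.get((link.get("kind") or "").lower(), 4)].append(link)
def bucketPush
    (b : List (List (String × String)) × List (List (String × String)) ×
      List (List (String × String)) × List (List (String × String)) ×
      List (List (String × String)))
    (link : List (String × String)) :
    List (List (String × String)) × List (List (String × String)) ×
      List (List (String × String)) × List (List (String × String)) ×
      List (List (String × String)) :=
  let i := linkRank link
  if i = 0 then (b.1 ++ [link], b.2.1, b.2.2.1, b.2.2.2.1, b.2.2.2.2)
  else if i = 1 then (b.1, b.2.1 ++ [link], b.2.2.1, b.2.2.2.1, b.2.2.2.2)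
  else if i = 2 then (b.1, b.2.1, b.2.2.1 ++ [link], b.2.2.2.1, b.2.2.2.2)
  else if i = 3 then (b.1, b.2.1, b.2.2.1, b.2.2.2.1 ++ [link], b.2.2.2.2)
  else (b.1, b.2.1, b.2.2.1, b.2.2.2.1, b.2.2.2.2 ++ [link])

-- Source B's picking loop body, state = (seen, picked); the `break` is the length guard
def stepB (st : PySem.Set String × List (List (String × String)))
    (link : List (String × String)) :
    PySem.Set String × List (List (String × String)) :=
  if 3 ≤ st.2.length then st
  else
    match pyOrStr (PySem.Dict.get? (PySem.Dict.mk link) "url")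
        (PySem.Dict.get? (PySem.Dict.mk link) "href") with
    | none => st
    | some h =>
      if (h == "") || PySem.Set.contains st.1 h then st
      else
        let label := pyOrStrD (PySem.Dict.get? (PySem.Dict.mk link) "label")
          (pyOrStrD (PySem.Dict.get? (PySem.Dict.mk link) "title") h)
        (PySem.Set.add st.1 h, st.2 ++ [pickEntry h label])

def derive_actionable_alt (members : List (List (String × List (List (String × String))))) :
    List (List (String × String)) :=
  (members.foldl
    (fun st m =>
      let b := (PySem.Dict.getD (PySem.Dict.mk m) "links" []).foldl bucketPush
        ([], [], [], [], [])
      (b.1 ++ b.2.1 ++ b.2.2.1 ++ b.2.2.2.1 ++ b.2.2.2.2).foldl stepB st)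
    (PySem.Set.empty, [])).2

-- ===== PRECONDITION & SPEC =====
def Spec_derive_actionable (members : List (List (String × List (List (String × String))))) (out : List (List (String × String))) : Prop := out = derive_actionable_alt members
instance (members : List (List (String × List (List (String × String))))) (out : List (List (String × String))) : Decidable (Spec_derive_actionable members out) := by unfold Spec_derive_actionable; infer_instance

-- ===== CLAIM (what is proved, stated in full; the proofs are below) =====
def Claim_equal_derive_actionable : Prop := ∀ (members : List (List (String × List (List (String × String))))), Dom_derive_actionable members → Spec_derive_actionable members (derive_actionable members)

-- ===== LEMMAS AND PROOFS =====

lemma rank_cases (l : List (String × String)) :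
    linkRank l = 0 ∨ linkRank l = 1 ∨ linkRank l = 2 ∨ linkRank l = 3 ∨ linkRank l = 4 := by
  unfold linkRank rankTable PySem.Dict.getD
  simp only [PySem.Dict.get?_mk_cons]
  split_ifs <;> simp [PySem.Dict.get?]

lemma insertBy_mid {α : Type} (key : α → Int) (x : α) (as bs : List α)
    (ha : ∀ a ∈ as, ¬ key x < key a) (hb : ∀ b ∈ bs, key x < key b) :
    PySem.List.insertBy (fun a b => decide (key a < key b)) x (as ++ bs) = as ++ x :: bs := by
  induction as with
  | nil =>
    cases bs with
    | nil => simp [PySem.List.insertBy]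
    | cons b bs' => simp [PySem.List.insertBy, hb b (by simp)]
  | cons a as' ih =>
    have hna : ¬ key x < key a := ha a (by simp)
    simp only [List.cons_append, PySem.List.insertBy, decide_eq_true_eq, if_neg hna]
    exact congrArg (a :: ·) (ih (fun a' h' => ha a' (by simp [h'])))

lemma rank_of_mem_filter {a : List (String × String)} {ls : List (List (String × String))}
    {i : Int} (h : a ∈ ls.filter (fun l => linkRank l == i)) : linkRank a = i := by
  simpa using List.of_mem_filter h

lemma sorted_rank (ls : List (List (String × String))) :
    PySem.List.sorted ls linkRank =
      ls.filter (fun l => linkRank l == 0) ++ ls.filter (fun l => linkRank l == 1) ++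
      ls.filter (fun l => linkRank l == 2) ++ ls.filter (fun l => linkRank l == 3) ++
      ls.filter (fun l => linkRank l == 4) := by
  rw [PySem.List.sorted_eq_foldl_insertBy]
  induction ls using List.reverseRecOn with
  | nil => rfl
  | append_singleton xs x ih =>
    rw [List.foldl_append, List.foldl_cons, List.foldl_nil, ih]
    rcases rank_cases x with hr | hr | hr | hr | hr
    · have h' := insertBy_mid linkRank x
        (xs.filter (fun l => linkRank l == 0))
        (xs.filter (fun l => linkRank l == 1) ++ xs.filter (fun l => linkRank l == 2) ++ xs.filter (fun l => linkRank l == 3) ++ xs.filter (fun l => linkRank l == 4))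
        (by
          intro a ham
          rw [hr, rank_of_mem_filter ham]; norm_num)
        (by
          intro b hbm
          simp only [List.mem_append] at hbm
          rcases hbm with (((h1 | h1) | h1) | h1) <;> (rw [hr, rank_of_mem_filter h1]; norm_num))
      simp only [List.append_assoc] at h' ⊢
      simp [h', List.filter_append, hr]
    · have h' := insertBy_mid linkRank x
        (xs.filter (fun l => linkRank l == 0) ++ xs.filter (fun l => linkRank l == 1))
        (xs.filter (fun l => linkRank l == 2) ++ xs.filter (fun l => linkRank l == 3) ++ xs.filter (fun l => linkRank l == 4))
        (by
          intro a ham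
          simp only [List.mem_append] at ham
          rcases ham with (h1 | h1) <;> (rw [hr, rank_of_mem_filter h1]; norm_num))
        (by
          intro b hbm
          simp only [List.mem_append] at hbm
          rcases hbm with ((h1 | h1) | h1) <;> (rw [hr, rank_of_mem_filter h1]; norm_num))
      simp only [List.append_assoc] at h' ⊢
      simp [h', List.filter_append, hr]
    · have h' := insertBy_mid linkRank x
        (xs.filter (fun l => linkRank l == 0) ++ xs.filter (fun l => linkRank l == 1) ++ xs.filter (fun l => linkRank l == 2))
        (xs.filter (fun l => linkRank l == 3) ++ xs.filter (fun l => linkRank l == 4))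
        (by
          intro a ham
          simp only [List.mem_append] at ham
          rcases ham with ((h1 | h1) | h1) <;> (rw [hr, rank_of_mem_filter h1]; norm_num))
        (by
          intro b hbm
          simp only [List.mem_append] at hbm
          rcases hbm with (h1 | h1) <;> (rw [hr, rank_of_mem_filter h1]; norm_num))
      simp only [List.append_assoc] at h' ⊢
      simp [h', List.filter_append, hr]
    · have h' := insertBy_mid linkRank x
        (xs.filter (fun l => linkRank l == 0) ++ xs.filter (fun l => linkRank l == 1) ++ xs.filter (fun l => linkRank l == 2) ++ xs.filter (fun l => linkRank l == 3))
        (xs.filter (fun l => linkRank l == 4))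
        (by
          intro a ham
          simp only [List.mem_append] at ham
          rcases ham with (((h1 | h1) | h1) | h1) <;> (rw [hr, rank_of_mem_filter h1]; norm_num))
        (by
          intro b hbm
          rw [hr, rank_of_mem_filter hbm]; norm_num)
      simp only [List.append_assoc] at h' ⊢
      simp [h', List.filter_append, hr]
    · have h' := insertBy_mid linkRank x
        (xs.filter (fun l => linkRank l == 0) ++ xs.filter (fun l => linkRank l == 1) ++ xs.filter (fun l => linkRank l == 2) ++ xs.filter (fun l => linkRank l == 3) ++ xs.filter (fun l => linkRank l == 4))
        ([])
        (by
          intro a ham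
          simp only [List.mem_append] at ham
          rcases ham with ((((h1 | h1) | h1) | h1) | h1) <;> (rw [hr, rank_of_mem_filter h1]; norm_num))
        (by simp)
      simp only [List.append_assoc, List.append_nil] at h' ⊢
      simp [h', List.filter_append, hr]

lemma bucket_fold (ls : List (List (String × String)))
    (b : List (List (String × String)) × List (List (String × String)) ×
      List (List (String × String)) × List (List (String × String)) ×
      List (List (String × String))) :
    ls.foldl bucketPush b =
      (b.1 ++ ls.filter (fun l => linkRank l == 0),
       b.2.1 ++ ls.filter (fun l => linkRank l == 1),
       b.2.2.1 ++ ls.filter (fun l => linkRank l == 2),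
       b.2.2.2.1 ++ ls.filter (fun l => linkRank l == 3),
       b.2.2.2.2 ++ ls.filter (fun l => linkRank l == 4)) := by
  induction ls generalizing b with
  | nil => simp
  | cons l ls ih =>
    rcases rank_cases l with hr | hr | hr | hr | hr <;>
      simp [List.foldl_cons, ih, bucketPush, hr]

lemma member_order (ls : List (List (String × String))) :
    (ls.foldl bucketPush ([], [], [], [], [])).1 ++
      (ls.foldl bucketPush ([], [], [], [], [])).2.1 ++
      (ls.foldl bucketPush ([], [], [], [], [])).2.2.1 ++
      (ls.foldl bucketPush ([], [], [], [], [])).2.2.2.1 ++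
      (ls.foldl bucketPush ([], [], [], [], [])).2.2.2.2 =
    PySem.List.sorted ls linkRank := by
  rw [bucket_fold, sorted_rank]
  simp [List.append_assoc]

lemma step_rel (s : PySem.Set String) (p : List (List (String × String)))
    (l : List (String × String)) :
    stepA (s, p, decide (3 ≤ p.length)) l =
      ((stepB (s, p) l).1, (stepB (s, p) l).2, decide (3 ≤ (stepB (s, p) l).2.length)) := by
  by_cases h3 : 3 ≤ p.length
  · simp [stepA, stepB, h3]
  · simp only [stepA, stepB, h3, decide_false, Bool.false_eq_true, if_false]
    cases pyOrStr (PySem.Dict.get? (PySem.Dict.mk l) "url")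
        (PySem.Dict.get? (PySem.Dict.mk l) "href") with
    | none => simp [h3]
    | some h =>
      by_cases hc : h = "" ∨ h ∈ s
      · simp [hc]
        omega
      · simp [hc]

lemma inner_rel (ls : List (List (String × String))) (s : PySem.Set String)
    (p : List (List (String × String))) :
    ls.foldl stepA (s, p, decide (3 ≤ p.length)) =
      ((ls.foldl stepB (s, p)).1, (ls.foldl stepB (s, p)).2,
        decide (3 ≤ (ls.foldl stepB (s, p)).2.length)) := by
  induction ls generalizing s p with
  | nil => rfl
  | cons l ls ih =>
    simp only [List.foldl_cons, step_rel s p l]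
    exact ih (stepB (s, p) l).1 (stepB (s, p) l).2

lemma stepB_full (ls : List (List (String × String))) (st : PySem.Set String × List (List (String × String)))
    (h : 3 ≤ st.2.length) : ls.foldl stepB st = st := by
  induction ls with
  | nil => rfl
  | cons l ls ih => simpa [stepB, if_pos h] using ih

lemma outer_rel (members : List (List (String × List (List (String × String)))))
    (s : PySem.Set String) (p : List (List (String × String))) :
    members.foldl
      (fun st m =>
        if st.2.2 then st
        else (PySem.List.sorted (PySem.Dict.getD (PySem.Dict.mk m) "links" []) linkRank).foldl
          stepA st)
      (s, p, decide (3 ≤ p.length)) =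
    (let r := members.foldl
        (fun st m =>
          let b := (PySem.Dict.getD (PySem.Dict.mk m) "links" []).foldl bucketPush
            ([], [], [], [], [])
          (b.1 ++ b.2.1 ++ b.2.2.1 ++ b.2.2.2.1 ++ b.2.2.2.2).foldl stepB st)
        (s, p)
     (r.1, r.2, decide (3 ≤ r.2.length))) := by
  induction members generalizing s p with
  | nil => rfl
  | cons m ms ih =>
    simp only [List.foldl_cons]
    by_cases h3 : 3 ≤ p.length
    · rw [if_pos (by simpa using h3)]
      have hB : List.foldl stepB (s, p)
          ((List.foldl bucketPush ([], [], [], [], []) (PySem.Dict.getD (PySem.Dict.mk m) "links" [])).1 ++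
            (List.foldl bucketPush ([], [], [], [], []) (PySem.Dict.getD (PySem.Dict.mk m) "links" [])).2.1 ++
            (List.foldl bucketPush ([], [], [], [], []) (PySem.Dict.getD (PySem.Dict.mk m) "links" [])).2.2.1 ++
            (List.foldl bucketPush ([], [], [], [], []) (PySem.Dict.getD (PySem.Dict.mk m) "links" [])).2.2.2.1 ++
            (List.foldl bucketPush ([], [], [], [], []) (PySem.Dict.getD (PySem.Dict.mk m) "links" [])).2.2.2.2)
          = (s, p) := stepB_full _ _ h3
      simp only [hB]
      exact ih s p
    · rw [if_neg (by simpa using h3), inner_rel, ← member_order]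
      exact ih _ _

-- ===== VERDICT (by name: the statement is the Claim_ definition above) =====
theorem derive_actionable_spec : Claim_equal_derive_actionable := by
  intro members _
  unfold Spec_derive_actionable derive_actionable derive_actionable_alt
  exact (congrArg (fun t => t.2.1) (outer_rel members PySem.Set.empty [])).trans rfl
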